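-- pv_equiv track=rewrite | github.com/GASTON-Baptiste-2326051aa/apprentissage_par_renforcement_jeu_de_nim | game_machine_machine.py | learning
-- ===== SOURCE A (Python) =====
-- table_color = {"yellow": 1, "red": 2, "blue": 4}
--
-- def learning(path, win, cups, nb_marbles, reset_history, nb_cups):
--     """
--     Fonction permettant de faire apprendre la machine
--     :param path: Tableau contenant les gobelets parcourus par la machine ainsi que la couleur de la bille piochée
--     :param win: Booléen indiquant si la machine a gagné (true) ou perdu (false)
--     :param cups: Tableau contenant les gobelets
--     :param nb_marbles: Nombre de billes à ajouter ou retirer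
--     :param nb_cups: Nombre de gobelets
--     :return: Nouveau tableau après apprentissage
--     """
--
--     for cup_index, color in path :
--         if cup_index == nb_cups-1:
--             continue
--
--         if win :
--             # On récupère l'indice du gobelet dans le tableau et on ajoute "nb_marble" fois
--             # La couleur qui a permis de gagner
--             for _ in range(nb_marbles) :
--                 cups[cup_index].append(color)
--         else :
--             for _ in range(nb_marbles) :
--                 if color in cups[cup_index] :
--                     cups[cup_index].remove(color)
--
--             if len(cups[cup_index]) == 0:
--                 reset_history.append(cup_index+1)
--                 cups[cup_index]=init_cup(2, nb_cups-cup_index)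
--
--     return cups
--
-- def init_cup(default_count, cups_left):
--     """
--     Fonction permettant d'initialiser un gobelet avec un nombre par défaut de billes de chaque couleur
--     :param default_count: Nombre de billes par couleur dans le gobelet
--     :param cups_left: Nombre de gobelets restants, sert à déterminer si certains coups deviennent impossibles à cause d'un nombre de gobelets restants insuffisant
--     :return: Un nouveau gobelet
--     """
--
--     return [color for color in table_color for _ in range(default_count) if table_color[color] <= cups_left]
-- ===== SOURCE B (Python) =====
-- table_color = {"yellow": 1, "red": 2, "blue": 4}
--
--
-- def _drop_first_n(cup, color, n):
--     """One pass: drop the first n occurrences of color (n may be <= 0)."""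
--     out = []
--     for m in cup:
--         if m == color and n > 0:
--             n -= 1
--         else:
--             out.append(m)
--     return out
--
--
-- def _init_cup(default_count, cups_left):
--     out = []
--     for color, value in table_color.items():
--         if value <= cups_left:
--             out.extend([color] * default_count)
--     return out
--
--
-- def learning(path, win, cups, nb_marbles, reset_history, nb_cups):
--     for cup_index, color in path:
--         if cup_index == nb_cups - 1:
--             continue
--         if win:
--             cups[cup_index].extend([color] * nb_marbles)
--         else:
--             cup = cups[cup_index]
--             cup[:] = _drop_first_n(cup, color, nb_marbles)
--             if not cup:
--                 reset_history.append(cup_index + 1)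
--                 cups[cup_index] = _init_cup(2, nb_cups - cup_index)
--     return cups
-- ===== Notes on version B (the rewrite author's own statement) =====
-- stated objective: alternative
-- what changed: A removes marbles by calling list.remove once per marble (each a scan) and appends one marble per loop iteration; B instead removes the first min(nb_marbles, count) occurrences in a single pass and appends with one extend of a replicated list. Pre_ excludes inputs where a non-skipped path entry carries an out-of-range cup index, on which A raises IndexError except in the accidental corner win=True with nb_marbles<=0 (the indexing sits inside a zero-iteration loop, so A returns cups unchanged) where B's single extend still indexes and raises.
-- outside the precondition, e.g. on learning([(5, 'red')], True, [['red']], 0, [], 0): A returns [['red']], B raises IndexError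
import Mathlib
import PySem

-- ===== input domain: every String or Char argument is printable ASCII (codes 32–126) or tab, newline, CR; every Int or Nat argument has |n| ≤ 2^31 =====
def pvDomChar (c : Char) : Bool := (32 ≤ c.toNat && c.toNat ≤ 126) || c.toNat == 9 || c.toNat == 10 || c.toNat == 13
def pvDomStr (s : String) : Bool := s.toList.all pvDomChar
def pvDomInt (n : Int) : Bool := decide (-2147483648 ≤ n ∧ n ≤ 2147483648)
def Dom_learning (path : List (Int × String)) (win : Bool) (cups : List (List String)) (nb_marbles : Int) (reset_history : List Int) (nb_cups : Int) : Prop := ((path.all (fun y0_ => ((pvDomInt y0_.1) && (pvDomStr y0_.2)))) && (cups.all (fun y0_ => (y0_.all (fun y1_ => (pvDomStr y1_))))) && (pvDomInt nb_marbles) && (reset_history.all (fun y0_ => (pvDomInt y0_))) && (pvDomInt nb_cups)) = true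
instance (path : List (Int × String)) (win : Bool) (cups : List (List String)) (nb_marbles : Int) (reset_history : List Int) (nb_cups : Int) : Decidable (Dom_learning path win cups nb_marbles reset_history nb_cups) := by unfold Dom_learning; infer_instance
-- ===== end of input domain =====

-- B replaces A's per-marble remove/append loops with a single-pass drop of the first min(nb_marbles, count)
-- occurrences and one extend of a replicated list (an alternative algorithm; fewer passes over each cup).
-- Both Pythons mutate cups and reset_history in place identically; the equivalence proved here is about the return value.

-- ===== PORT A =====
def tableColorA : List (String × Int) := [("yellow", 1), ("red", 2), ("blue", 4)]

-- [color for color in table_color for _ in range(default_count) if table_color[color] <= cups_left]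
def initCup (default_count : Int) (cups_left : Int) : List String :=
  tableColorA.foldl (fun acc cv =>
    (PySem.List.pyRange 0 default_count 1).foldl
      (fun acc2 _ => if cv.2 ≤ cups_left then acc2 ++ [cv.1] else acc2) acc) []

-- the body of A's 'for cup_index, color in path' loop (in-place mutation modelled by get/set each step)
def stepA (win : Bool) (nb_marbles nb_cups : Int) (cups : List (List String)) (pc : Int × String) : List (List String) :=
  if pc.1 = nb_cups - 1 then cups
  else if win then
    (PySem.List.pyRange 0 nb_marbles 1).foldl
      (fun cs _ => PySem.List.pySetD cs pc.1 (PySem.List.pyGetD cs pc.1 [] ++ [pc.2])) cups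
  else
    let cs := (PySem.List.pyRange 0 nb_marbles 1).foldl
      (fun cs _ =>
        let cup := PySem.List.pyGetD cs pc.1 []
        if pc.2 ∈ cup then PySem.List.pySetD cs pc.1 ((PySem.List.remove? cup pc.2).getD cup) else cs) cups
    if (PySem.List.pyGetD cs pc.1 []).length = 0 then
      PySem.List.pySetD cs pc.1 (initCup 2 (nb_cups - pc.1))
    else cs

def learning (path : List (Int × String)) (win : Bool) (cups : List (List String)) (nb_marbles : Int) (reset_history : List Int) (nb_cups : Int) : List (List String) :=
  path.foldl (stepA win nb_marbles nb_cups) cups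

-- ===== PORT B =====
-- _drop_first_n: one pass, drop the first n occurrences of c (n may be ≤ 0)
def dropFirstN : List String → String → Int → List String
  | [], _, _ => []
  | m :: ms, c, n => if m = c ∧ 0 < n then dropFirstN ms c (n - 1) else m :: dropFirstN ms c n

-- _init_cup: one extend of [color]*default_count per admitted color
def initCupAlt (default_count : Int) (cups_left : Int) : List String :=
  tableColorA.foldl (fun acc cv =>
    if cv.2 ≤ cups_left then acc ++ List.replicate default_count.toNat cv.1 else acc) []

def stepB (win : Bool) (nb_marbles nb_cups : Int) (cups : List (List String)) (pc : Int × String) : List (List String) :=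
  if pc.1 = nb_cups - 1 then cups
  else if win then
    PySem.List.pySetD cups pc.1
      (PySem.List.pyGetD cups pc.1 [] ++ List.replicate nb_marbles.toNat pc.2)
  else
    let cup := dropFirstN (PySem.List.pyGetD cups pc.1 []) pc.2 nb_marbles
    if cup.isEmpty then PySem.List.pySetD cups pc.1 (initCupAlt 2 (nb_cups - pc.1))
    else PySem.List.pySetD cups pc.1 cup

def learning_alt (path : List (Int × String)) (win : Bool) (cups : List (List String)) (nb_marbles : Int) (reset_history : List Int) (nb_cups : Int) : List (List String) :=
  path.foldl (stepB win nb_marbles nb_cups) cups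

-- ===== PRECONDITION & SPEC =====
-- Pre_ excludes path entries with an out-of-range cup index (not equal to nb_cups-1): A raises IndexError
-- there, except in the accidental corner win=True, nb_marbles ≤ 0, where the indexing sits in a
-- zero-iteration loop and A returns cups unchanged while B's single extend still indexes and raises.
def Pre_learning (path : List (Int × String)) (win : Bool) (cups : List (List String)) (nb_marbles : Int) (reset_history : List Int) (nb_cups : Int) : Prop :=
  ∀ p ∈ path, p.1 ≠ nb_cups - 1 → PySem.Raise.InRange cups.length p.1
instance (path : List (Int × String)) (win : Bool) (cups : List (List String)) (nb_marbles : Int) (reset_history : List Int) (nb_cups : Int) : Decidable (Pre_learning path win cups nb_marbles reset_history nb_cups) := by unfold Pre_learning; infer_instance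
def pvWitness_learning : (List (Int × String)) × Bool × List (List String) × Int × List Int × Int :=
  ([(0, "red")], false, [["red", "yellow"], ["blue"]], 1, [], 3)

def Spec_learning (path : List (Int × String)) (win : Bool) (cups : List (List String)) (nb_marbles : Int) (reset_history : List Int) (nb_cups : Int) (out : List (List String)) : Prop := out = learning_alt path win cups nb_marbles reset_history nb_cups
instance (path : List (Int × String)) (win : Bool) (cups : List (List String)) (nb_marbles : Int) (reset_history : List Int) (nb_cups : Int) (out : List (List String)) : Decidable (Spec_learning path win cups nb_marbles reset_history nb_cups out) := by unfold Spec_learning; infer_instance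

-- ===== CLAIM (what is proved, stated in full; the proofs are below) =====
def Claim_equal_learning : Prop := ∀ (path : List (Int × String)) (win : Bool) (cups : List (List String)) (nb_marbles : Int) (reset_history : List Int) (nb_cups : Int), Dom_learning path win cups nb_marbles reset_history nb_cups → Pre_learning path win cups nb_marbles reset_history nb_cups → Spec_learning path win cups nb_marbles reset_history nb_cups (learning path win cups nb_marbles reset_history nb_cups)

-- ===== LEMMAS AND PROOFS =====

-- a fold whose step fixes the start state fixes the fold
theorem foldl_fixed {α β : Type} (f : α → β → α) (a : α) (h : ∀ b, f a b = a) :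
    ∀ L : List β, L.foldl f a = a := by
  intro L; induction L with
  | nil => rfl
  | cons x xs ih => simpa [List.foldl, h x] using ih

-- pySetD/pyGetD facts at an index known to hold a value
theorem pySetD_self {α : Type} (xs : List α) (i : Int) (v : α)
    (h : PySem.List.pyGet? xs i = some v) : PySem.List.pySetD xs i v = xs := by
  cases hk : PySem.List.pyIdx? xs.length i with
  | none => simp [PySem.List.pyGet?, hk] at h
  | some k =>
    have hv : xs[k]? = some v := by simpa [PySem.List.pyGet?, hk] using h
    obtain ⟨hlt, hveq⟩ := List.getElem?_eq_some_iff.mp hv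
    simp [PySem.List.pySetD, PySem.List.pySet?, hk, ← hveq, List.set_getElem_self hlt]

theorem pyGet?_pySetD {α : Type} (xs : List α) (i : Int) (v w : α)
    (h : PySem.List.pyGet? xs i = some v) :
    PySem.List.pyGet? (PySem.List.pySetD xs i w) i = some w := by
  cases hk : PySem.List.pyIdx? xs.length i with
  | none => simp [PySem.List.pyGet?, hk] at h
  | some k =>
    have hv : xs[k]? = some v := by simpa [PySem.List.pyGet?, hk] using h
    have hlt : k < xs.length := (List.getElem?_eq_some_iff.mp hv).1
    have hk2 : PySem.List.pyIdx? (xs.set k w).length i = some k := by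
      simpa [List.length_set] using hk
    simp [PySem.List.pyGet?, PySem.List.pySetD, PySem.List.pySet?, hk, hk2, hlt]

theorem pySetD_pySetD {α : Type} (xs : List α) (i : Int) (v w : α) :
    PySem.List.pySetD (PySem.List.pySetD xs i v) i w = PySem.List.pySetD xs i w := by
  simp only [PySem.List.pySetD, PySem.List.pySet?]
  cases hk : PySem.List.pyIdx? xs.length i with
  | none => simp [hk]
  | some k => simp [hk, List.set_set]

theorem pySetD_none {α : Type} (xs : List α) (i : Int) (v : α)
    (h : PySem.List.pyGet? xs i = none) : PySem.List.pySetD xs i v = xs := by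
  cases hk : PySem.List.pyIdx? xs.length i with
  | none => simp [PySem.List.pySetD, PySem.List.pySet?, hk]
  | some k =>
    have hv : xs[k]? = none := by simpa [PySem.List.pyGet?, hk] using h
    have hle : xs.length ≤ k := by
      by_contra hlt
      simp [List.getElem?_eq_getElem (by omega : k < xs.length)] at hv
    simp [PySem.List.pySetD, PySem.List.pySet?, hk, List.set_eq_of_length_le hle]

-- one Python 'remove if present' step
def rm1 (cup : List String) (c : String) : List String :=
  if c ∈ cup then (PySem.List.remove? cup c).getD cup else cup

theorem dropFirstN_nonpos (cup : List String) (c : String) (n : Int) (h : n ≤ 0) :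
    dropFirstN cup c n = cup := by
  induction cup with
  | nil => rfl
  | cons m ms ih => simp [dropFirstN, ih]; omega

theorem dropFirstN_succ (cup : List String) (c : String) (n : Nat) :
    dropFirstN cup c ((n : Int) + 1) = dropFirstN (rm1 cup c) c (n : Int) := by
  induction cup with
  | nil => simp [dropFirstN, rm1]
  | cons m ms ih =>
    by_cases hm : m = c
    · subst hm
      simp [dropFirstN, rm1, PySem.List.remove?_cons_self,
        show (0:Int) < (n:Int) + 1 by positivity]
    · have hm' : m ≠ c := hm
      have hrm : rm1 (m :: ms) c = m :: rm1 ms c := by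
        by_cases hc : c ∈ ms
        · have hcm : c ∈ m :: ms := List.mem_cons_of_mem _ hc
          rw [rm1, rm1, if_pos hcm, if_pos hc, PySem.List.remove?_cons_of_ne ms hm']
          cases hr : PySem.List.remove? ms c with
          | none => exact absurd hc ((PySem.List.remove?_eq_none_iff ms c).mp hr)
          | some l => simp
        · have hcm : c ∉ m :: ms := by
            intro h
            rcases List.mem_cons.mp h with h1 | h2
            · exact hm' h1.symm
            · exact hc h2
          rw [rm1, rm1, if_neg hcm, if_neg hc]
      rw [hrm]
      simp only [dropFirstN, hm, false_and, if_false]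
      exact congrArg (m :: ·) ih

-- A's win loop appends one marble per iteration = one appended replicate
theorem winLoop (c : String) (i : Int) :
    ∀ (L : List Int) (xs : List (List String)) (cup : List String),
      PySem.List.pyGet? xs i = some cup →
      L.foldl (fun cs _ => PySem.List.pySetD cs i (PySem.List.pyGetD cs i [] ++ [c])) xs
        = PySem.List.pySetD xs i (cup ++ List.replicate L.length c) := by
  intro L
  induction L with
  | nil => intro xs cup h; simp [pySetD_self xs i cup h]
  | cons x xs ih =>
    intro cs cup h
    have hget : PySem.List.pyGetD cs i [] = cup := by simp [PySem.List.pyGetD, h]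
    have h2 : PySem.List.pyGet? (PySem.List.pySetD cs i (cup ++ [c])) i = some (cup ++ [c]) :=
      pyGet?_pySetD cs i cup (cup ++ [c]) h
    simp only [List.foldl, hget]
    rw [ih _ _ h2, pySetD_pySetD]
    simp [List.replicate_succ, List.append_assoc]

-- A's lose loop (remove-first n times) = B's single-pass dropFirstN
theorem loseLoop (c : String) (i : Int) :
    ∀ (L : List Int) (xs : List (List String)) (cup : List String),
      PySem.List.pyGet? xs i = some cup →
      L.foldl (fun cs _ =>
          let cup := PySem.List.pyGetD cs i []
          if c ∈ cup then PySem.List.pySetD cs i ((PySem.List.remove? cup c).getD cup) else cs) xs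
        = PySem.List.pySetD xs i (dropFirstN cup c (L.length : Int)) := by
  intro L
  induction L with
  | nil =>
    intro xs cup h
    simp [dropFirstN_nonpos cup c 0 le_rfl, pySetD_self xs i cup h]
  | cons x xs ih =>
    intro cs cup h
    have hget : PySem.List.pyGetD cs i [] = cup := by simp [PySem.List.pyGetD, h]
    have hstep : (if c ∈ cup then PySem.List.pySetD cs i ((PySem.List.remove? cup c).getD cup) else cs)
        = PySem.List.pySetD cs i (rm1 cup c) := by
      by_cases hc : c ∈ cup
      · simp [rm1, hc]
      · simp [rm1, hc, pySetD_self cs i cup h]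
    have h2 : PySem.List.pyGet? (PySem.List.pySetD cs i (rm1 cup c)) i = some (rm1 cup c) :=
      pyGet?_pySetD cs i cup (rm1 cup c) h
    simp only [List.foldl, hget, hstep]
    rw [ih _ _ h2, pySetD_pySetD]
    have : ((xs.length + 1 : Nat) : Int) = (xs.length : Int) + 1 := by push_cast; ring
    rw [List.length_cons, this, dropFirstN_succ]

theorem initCup_eq (k : Int) : initCup 2 k = initCupAlt 2 k := by
  have h : PySem.List.pyRange 0 2 1 = [0, 1] := by decide
  simp only [initCup, initCupAlt, tableColorA, h, List.foldl]
  norm_num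
  split_ifs <;> rfl

theorem step_eq (win : Bool) (nb nc : Int) (cups : List (List String)) (pc : Int × String) :
    stepA win nb nc cups pc = stepB win nb nc cups pc := by
  unfold stepA stepB
  by_cases hskip : pc.1 = nc - 1
  · simp [hskip]
  · simp only [hskip, if_false]
    cases hg : PySem.List.pyGet? cups pc.1 with
    | none =>
      have hgd : PySem.List.pyGetD cups pc.1 [] = [] := by simp [PySem.List.pyGetD, hg]
      cases win with
      | true =>
        simp only [if_true]
        rw [foldl_fixed _ _ (fun b => by rw [hgd]; exact pySetD_none cups pc.1 _ hg)]
        rw [pySetD_none cups pc.1 _ hg]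
      | false =>
        simp only [Bool.false_eq_true, if_false]
        rw [foldl_fixed _ _ (fun b => by simp [hgd])]
        simp [hgd, dropFirstN, pySetD_none cups pc.1 _ hg]
    | some cup =>
      have hgd : PySem.List.pyGetD cups pc.1 [] = cup := by simp [PySem.List.pyGetD, hg]
      cases win with
      | true =>
        simp only [if_true]
        rw [winLoop pc.2 pc.1 _ cups cup hg, hgd]
        have hl : (PySem.List.pyRange 0 nb 1).length = nb.toNat := by
          simp [PySem.List.length_pyRange_one]
        rw [hl]
      | false =>
        simp only [Bool.false_eq_true, if_false]
        rw [loseLoop pc.2 pc.1 _ cups cup hg, hgd]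
        have hlen : ((PySem.List.pyRange 0 nb 1).length : Int) = max nb 0 := by
          have := PySem.List.length_pyRange_one 0 nb
          omega
        rw [hlen]
        have hdrop : dropFirstN cup pc.2 (max nb 0) = dropFirstN cup pc.2 nb := by
          by_cases hnb : nb ≤ 0
          · rw [max_eq_right hnb, dropFirstN_nonpos _ _ _ le_rfl, dropFirstN_nonpos _ _ _ hnb]
          · rw [max_eq_left (by omega)]
        rw [hdrop]
        have hget2 : PySem.List.pyGetD (PySem.List.pySetD cups pc.1 (dropFirstN cup pc.2 nb)) pc.1 []
            = dropFirstN cup pc.2 nb := by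
          simp [PySem.List.pyGetD, pyGet?_pySetD cups pc.1 cup _ hg]
        rw [hget2]
        by_cases hemp : dropFirstN cup pc.2 nb = []
        · simp [hemp, pySetD_pySetD, initCup_eq]
        · simp [hemp, List.isEmpty_iff, List.length_eq_zero_iff]

-- ===== VERDICT (by name: the statement is the Claim_ definition above) =====
theorem learning_spec : Claim_equal_learning := by
  intro path win cups nb_marbles reset_history nb_cups _ _
  show learning path win cups nb_marbles reset_history nb_cups
      = learning_alt path win cups nb_marbles reset_history nb_cups
  unfold learning learning_alt
  have hf : stepA win nb_marbles nb_cups = stepB win nb_marbles nb_cups := by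
    funext cs pc; exact step_eq win nb_marbles nb_cups cs pc
  rw [hf]
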